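-- pv_equiv track=rewrite | github.com/jmsether/QuizPeek | hotkey.py | _normalize_combo
-- ===== SOURCE A (Python) =====
-- def _normalize_combo(combo: str) -> str:
--     """Normalize combo string to canonical format."""
--     parts = combo.replace(' ', '').split('+')
--     # Sort modifiers, keep order for keys
--     modifiers = []
--     keys = []
--     for part in parts:
--         if part.lower() in ['ctrl', 'control', 'alt', 'shift', 'cmd', 'command', 'super', 'win']:
--             modifiers.append(part.lower())
--         else:
--             keys.append(part.lower())
--     modifiers.sort()
--     return '+'.join(modifiers + keys)
-- ===== SOURCE B (Python) =====
-- _MODIFIERS = ('ctrl', 'control', 'alt', 'shift', 'cmd', 'command', 'super', 'win')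
--
--
-- def _normalize_combo(combo: str) -> str:
--     """Normalize combo string to canonical format."""
--     parts = [p.lower() for p in combo.replace(' ', '').split('+')]
--     # One stable sort: modifiers get key (0, name) so they come first in
--     # alphabetical order; keys get the constant key (1, '') so stability
--     # preserves their original relative order.
--     return '+'.join(sorted(parts, key=lambda p: (0, p) if p in _MODIFIERS else (1, '')))
-- ===== Notes on version B (the rewrite author's own statement) =====
-- stated objective: idiomatic
-- what changed: Replaces A's two accumulator lists plus a separate modifiers.sort() with a single stable sorted() call over the lowered parts using a (modifier-rank, name) key, relying on sort stability to keep non-modifier keys in original order.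
import Mathlib
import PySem

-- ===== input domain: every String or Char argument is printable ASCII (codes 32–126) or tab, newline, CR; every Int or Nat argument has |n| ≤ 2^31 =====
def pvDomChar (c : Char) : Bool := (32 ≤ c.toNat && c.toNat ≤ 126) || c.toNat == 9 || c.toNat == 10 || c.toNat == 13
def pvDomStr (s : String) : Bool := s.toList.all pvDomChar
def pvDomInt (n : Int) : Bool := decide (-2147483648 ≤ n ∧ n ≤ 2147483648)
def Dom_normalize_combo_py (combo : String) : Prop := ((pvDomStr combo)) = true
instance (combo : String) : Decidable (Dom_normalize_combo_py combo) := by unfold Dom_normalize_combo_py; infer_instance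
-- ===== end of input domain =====

-- B replaces A's two accumulator lists + separate sort by one stable sorted() pass with a
-- (modifier-rank, name) key; same result, simpler decomposition (objective: idiomatic).


-- ===== PORT A =====
def normalize_combo_py (combo : String) : String :=
  let parts := (PySem.Str.split? (PySem.Str.replace combo " " "") "+").getD []
  let mk := parts.foldl (fun (acc : List String × List String) part =>
      if ["ctrl", "control", "alt", "shift", "cmd", "command", "super", "win"].contains
          (PySem.Str.lower part) then
        (acc.1 ++ [PySem.Str.lower part], acc.2)
      else
        (acc.1, acc.2 ++ [PySem.Str.lower part])) ([], [])
  PySem.Str.join "+" (PySem.List.sorted mk.1 (fun x => x) false ++ mk.2)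

-- ===== PORT B =====
def normalize_combo_py_alt (combo : String) : String :=
  let parts := ((PySem.Str.split? (PySem.Str.replace combo " " "") "+").getD []).map
      PySem.Str.lower
  PySem.Str.join "+"
    (PySem.List.sorted2 parts
      (fun p => if ["ctrl", "control", "alt", "shift", "cmd", "command", "super", "win"].contains p
        then (0 : Int) else 1)
      (fun p => if ["ctrl", "control", "alt", "shift", "cmd", "command", "super", "win"].contains p
        then p else "") false)

-- ===== PRECONDITION & SPEC =====
def Spec_normalize_combo_py (combo : String) (out : String) : Prop := out = normalize_combo_py_alt combo
instance (combo : String) (out : String) : Decidable (Spec_normalize_combo_py combo out) := by unfold Spec_normalize_combo_py; infer_instance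

-- ===== CLAIM (what is proved, stated in full; the proofs are below) =====
def Claim_equal_normalize_combo_py : Prop := ∀ (combo : String), Dom_normalize_combo_py combo → Spec_normalize_combo_py combo (normalize_combo_py combo)

-- ===== LEMMAS AND PROOFS =====

-- B's comparison function (sorted2's `lt`), generalized over the modifier test.
def pvBeforeB (isMod : String → Bool) (a b : String) : Bool :=
  decide ((if isMod a then (0 : Int) else 1) < (if isMod b then (0 : Int) else 1)) ||
    (!decide ((if isMod b then (0 : Int) else 1) < (if isMod a then (0 : Int) else 1)) &&
      decide ((if isMod a then a else "") < (if isMod b then b else "")))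

theorem pvBeforeB_key_false (isMod : String → Bool) (k y : String) (hk : isMod k = false) :
    pvBeforeB isMod k y = false := by
  unfold pvBeforeB
  cases h : isMod y
  · simp [hk]
  · simp [hk]

theorem pvInsert_key (isMod : String → Bool) (k : String) (hk : isMod k = false)
    (l : List String) :
    PySem.List.insertBy (pvBeforeB isMod) k l = l ++ [k] :=
  PySem.List.insertBy_of_forall_not_before _ _ _ (fun y _ => pvBeforeB_key_false isMod k y hk)

theorem pvInsert_mod (isMod : String → Bool) (m : String) (hm : isMod m = true)
    (ms ks : List String) (hms : ∀ x ∈ ms, isMod x = true) (hks : ∀ x ∈ ks, isMod x = false) :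
    PySem.List.insertBy (pvBeforeB isMod) m (ms ++ ks) =
      PySem.List.insertBy (fun a b => decide (a < b)) m ms ++ ks := by
  induction ms with
  | nil =>
    cases ks with
    | nil => simp [PySem.List.insertBy]
    | cons k ks' =>
      have hk := hks k (by simp)
      simp [PySem.List.insertBy, pvBeforeB, hm, hk]
  | cons y ys ih =>
    have hy := hms y (by simp)
    have hb : pvBeforeB isMod m y = decide (m < y) := by
      simp [pvBeforeB, hm, hy]
    simp only [List.cons_append, PySem.List.insertBy, hb]
    by_cases h : m < y
    · simp [h]
    · simp [h, ih (fun x hx => hms x (by simp [hx]))]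

theorem pvFoldB (isMod : String → Bool) (parts : List String) :
    ∀ (ms ks : List String), (∀ x ∈ ms, isMod x = true) → (∀ x ∈ ks, isMod x = false) →
    parts.foldl (fun acc p => PySem.List.insertBy (pvBeforeB isMod) p acc) (ms ++ ks) =
      (parts.filter isMod).foldl
          (fun acc p => PySem.List.insertBy (fun a b => decide (a < b)) p acc) ms ++
        (ks ++ parts.filter (fun p => !isMod p)) := by
  induction parts with
  | nil => intro ms ks _ _; simp
  | cons p rest ih =>
    intro ms ks hms hks
    cases h : isMod p with
    | true =>
      have hstep := pvInsert_mod isMod p h ms ks hms hks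
      have hms' : ∀ x ∈ PySem.List.insertBy (fun a b => decide (a < b)) p ms, isMod x = true := by
        intro x hx
        rcases (PySem.List.mem_insertBy _ _ _ _).1 hx with rfl | hx
        · exact h
        · exact hms x hx
      simp only [List.foldl_cons, hstep, List.filter_cons, h, Bool.not_true, Bool.false_eq_true,
        if_true, if_false, List.foldl_cons]
      exact ih _ ks hms' hks
    | false =>
      have hstep := pvInsert_key isMod p h (ms ++ ks)
      have hks' : ∀ x ∈ ks ++ [p], isMod x = false := by
        intro x hx
        rcases List.mem_append.1 hx with hx | hx
        · exact hks x hx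
        · simp at hx; subst hx; exact h
      simp only [List.foldl_cons, hstep, List.append_assoc]
      rw [ih ms (ks ++ [p]) hms hks']
      simp [h]

theorem pvFoldA (isMod : String → Bool) (parts : List String) :
    ∀ (m0 k0 : List String),
    parts.foldl (fun (acc : List String × List String) part =>
        if isMod (PySem.Str.lower part) then
          (acc.1 ++ [PySem.Str.lower part], acc.2)
        else
          (acc.1, acc.2 ++ [PySem.Str.lower part])) (m0, k0) =
      (m0 ++ (parts.map PySem.Str.lower).filter isMod,
        k0 ++ (parts.map PySem.Str.lower).filter (fun p => !isMod p)) := by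
  induction parts with
  | nil => intro m0 k0; simp
  | cons p rest ih =>
    intro m0 k0
    cases h : isMod (PySem.Str.lower p) with
    | true => simp [h, ih]
    | false => simp [h, ih]

def pvIsMod (p : String) : Bool :=
  ["ctrl", "control", "alt", "shift", "cmd", "command", "super", "win"].contains p

theorem pvMain (parts : List String) :
    PySem.List.sorted
        (parts.foldl (fun (acc : List String × List String) part =>
          if pvIsMod (PySem.Str.lower part) then
            (acc.1 ++ [PySem.Str.lower part], acc.2)
          else
            (acc.1, acc.2 ++ [PySem.Str.lower part])) ([], [])).1 (fun x => x) false ++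
      (parts.foldl (fun (acc : List String × List String) part =>
          if pvIsMod (PySem.Str.lower part) then
            (acc.1 ++ [PySem.Str.lower part], acc.2)
          else
            (acc.1, acc.2 ++ [PySem.Str.lower part])) ([], [])).2 =
    PySem.List.sorted2 (parts.map PySem.Str.lower)
      (fun p => if pvIsMod p then (0 : Int) else 1)
      (fun p => if pvIsMod p then p else "") false := by
  have hs2 : PySem.List.sorted2 (parts.map PySem.Str.lower)
      (fun p => if pvIsMod p then (0 : Int) else 1)
      (fun p => if pvIsMod p then p else "") false =
      (parts.map PySem.Str.lower).foldl
        (fun acc p => PySem.List.insertBy (pvBeforeB pvIsMod) p acc) [] := rfl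
  have hB := pvFoldB pvIsMod (parts.map PySem.Str.lower) [] [] (by simp) (by simp)
  simp only [List.nil_append] at hB
  rw [hs2, pvFoldA pvIsMod parts [] [], hB, PySem.List.sorted_eq_foldl_insertBy]
  simp

-- ===== VERDICT (by name: the statement is the Claim_ definition above) =====
theorem normalize_combo_py_spec : Claim_equal_normalize_combo_py := by
  intro combo _
  show normalize_combo_py combo = normalize_combo_py_alt combo
  unfold normalize_combo_py normalize_combo_py_alt
  exact congrArg (PySem.Str.join "+") (pvMain _)
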